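-- pv_equiv track=rewrite | github.com/goyalatul2410/assignment | assignment.py | ways_to_attend_class
-- ===== SOURCE A (Python) =====
-- def ways_to_attend_class(n):
--     if n == 1:
--         return 2
--     if n == 2:
--         return 4
--     if n == 3:
--         return 8
--     if n == 4:
--         return 15
--
--     return ways_to_attend_class(n-1) + ways_to_attend_class(n-2) + ways_to_attend_class(n-3) + ways_to_attend_class(n-4)
-- ===== SOURCE B (Python) =====
-- def ways_to_attend_class(n):
--     vals = [2, 4, 8, 15]
--     if n <= 4:
--         return vals[n - 1]
--     a, b, c, d = vals
--     for _ in range(n - 4):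
--         a, b, c, d = b, c, d, a + b + c + d
--     return d
-- ===== Notes on version B (the rewrite author's own statement) =====
-- stated objective: faster
-- what changed: Replaces the naive 4-way exponential recursion by an iterative loop keeping only the last four values.
import Mathlib
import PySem

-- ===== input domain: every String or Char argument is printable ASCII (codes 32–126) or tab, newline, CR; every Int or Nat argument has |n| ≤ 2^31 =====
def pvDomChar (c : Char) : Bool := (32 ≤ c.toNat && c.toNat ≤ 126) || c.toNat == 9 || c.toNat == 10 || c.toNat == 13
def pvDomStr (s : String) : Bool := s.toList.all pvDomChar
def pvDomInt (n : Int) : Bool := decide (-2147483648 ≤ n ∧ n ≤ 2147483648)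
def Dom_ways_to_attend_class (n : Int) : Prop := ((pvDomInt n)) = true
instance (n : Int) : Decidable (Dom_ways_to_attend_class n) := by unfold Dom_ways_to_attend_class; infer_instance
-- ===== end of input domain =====

-- B replaces A's exponential 4-way recursion by an O(n) loop over the last four values.

-- ===== PORT A =====
-- A's recursion on an Int argument, reindexed over a Nat measure so Lean sees termination;
-- the 0 case is unreachable from Pre_ (Python A recurses forever for n ≤ 0).
def waysA : Nat → Int
  | 0 => 0
  | 1 => 2
  | 2 => 4
  | 3 => 8
  | 4 => 15
  | n + 5 => waysA (n + 4) + waysA (n + 3) + waysA (n + 2) + waysA (n + 1)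

def ways_to_attend_class (n : Int) : Int :=
  if n ≤ 0 then 0 else waysA n.toNat

-- ===== PORT B =====
-- one loop step: a, b, c, d = b, c, d, a + b + c + d
def altStep (s : Int × Int × Int × Int) : Int × Int × Int × Int :=
  (s.2.1, s.2.2.1, s.2.2.2, s.1 + s.2.1 + s.2.2.1 + s.2.2.2)

def ways_to_attend_class_alt (n : Int) : Int :=
  if n ≤ 4 then
    (PySem.List.pyGet? ([2, 4, 8, 15] : List Int) (n - 1)).getD 0
  else
    let s := (PySem.List.pyRange 0 (n - 4) 1).foldl (fun s _ => altStep s) (2, 4, 8, 15)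
    s.2.2.2

-- ===== PRECONDITION & SPEC =====
-- A recurses without a base case for n ≤ 0 (Python raises RecursionError there)
def Pre_ways_to_attend_class (n : Int) : Prop := 1 ≤ n
instance (n : Int) : Decidable (Pre_ways_to_attend_class n) := by unfold Pre_ways_to_attend_class; infer_instance
def pvWitness_ways_to_attend_class : Int := 6

def Spec_ways_to_attend_class (n : Int) (out : Int) : Prop := out = ways_to_attend_class_alt n
instance (n : Int) (out : Int) : Decidable (Spec_ways_to_attend_class n out) := by unfold Spec_ways_to_attend_class; infer_instance

-- ===== CLAIM =====
def Claim_equal_ways_to_attend_class : Prop := ∀ (n : Int), Dom_ways_to_attend_class n → Pre_ways_to_attend_class n → Spec_ways_to_attend_class n (ways_to_attend_class n)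

-- ===== LEMMAS AND PROOFS =====

-- folding a step that ignores the list element is iteration by the list's length
theorem foldl_const_step {α σ : Type} (f : σ → σ) (l : List α) (s : σ) :
    l.foldl (fun s _ => f s) s = f^[l.length] s := by
  induction l generalizing s with
  | nil => rfl
  | cons x xs ih => simp [List.foldl, Function.iterate_succ_apply, ih]

-- loop invariant: after k steps the state holds waysA (k+1) … waysA (k+4)
theorem iterate_altStep (k : Nat) :
    altStep^[k] (2, 4, 8, 15) =
      (waysA (k + 1), waysA (k + 2), waysA (k + 3), waysA (k + 4)) := by
  induction k with
  | zero => rfl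
  | succ k ih =>
      rw [Function.iterate_succ_apply', ih]
      show (waysA (k + 2), waysA (k + 3), waysA (k + 4),
            waysA (k + 1) + waysA (k + 2) + waysA (k + 3) + waysA (k + 4)) = _
      have : waysA (k + 1 + 4) =
          waysA (k + 4) + waysA (k + 3) + waysA (k + 2) + waysA (k + 1) := by
        show waysA (k + 5) = _
        simp [waysA]
      simp [this]
      ring

-- ===== VERDICT =====
theorem ways_to_attend_class_spec : Claim_equal_ways_to_attend_class := by
  intro n _ hn
  have hn1 : 1 ≤ n := hn
  unfold Spec_ways_to_attend_class ways_to_attend_class ways_to_attend_class_alt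
  by_cases h4 : n ≤ 4
  · -- n ∈ {1,2,3,4}
    have : n = 1 ∨ n = 2 ∨ n = 3 ∨ n = 4 := by omega
    rcases this with rfl | rfl | rfl | rfl <;> decide
  · rw [if_neg (by omega : ¬ n ≤ 0), if_neg h4]
    rw [foldl_const_step altStep (PySem.List.pyRange 0 (n - 4) 1)]
    rw [PySem.List.length_pyRange_one]
    have hlen : (n - 4 - 0).toNat = n.toNat - 4 := by omega
    rw [hlen, iterate_altStep]
    have : n.toNat - 4 + 4 = n.toNat := by omega
    rw [this]
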